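-- pv_equiv track=rewrite | github.com/graalvm/mx | src/mx/_impl/support/java_argument_file.py | escape_argument
-- ===== SOURCE A (Python) =====
-- SPECIAL_CHARS = [" ", "'", '"', "\n", "\r", "\t", "\f"]
--
-- def escape_argument(arg: str) -> str:
--     """
--     Escapes a single commandline argument for use in a Java argument file.
--
--     The returned argument can be put on its own line or next to other arguments on the same line separated by a space.
--     """
--     if not arg:
--         # Empty arguments need to be quoted, otherwise they are ignored
--         return '""'
--
--     if any((c in arg for c in SPECIAL_CHARS)):
--         # Argument contains special characters and needs to be put in quotes
--         escaped = (
--             # Inside quotes, backslashes are escape characters, so any existing backslashes need to be escaped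
--             arg.replace("\\", "\\\\")
--             # Escape quotation marks to not interfere with the surrounding quotes
--             .replace("'", "\\'")
--             .replace('"', '\\"')
--             # Control characters are replaced with their literal escape sequence. These are properly interpreted when
--             # the file is read
--             .replace("\n", "\\n")
--             .replace("\r", "\\r")
--             .replace("\t", "\\t")
--             .replace("\f", "\\f")
--         )
--         return f'"{escaped}"'
--     else:
--         # Otherwise, the argument can be used as-is
--         return arg
-- ===== SOURCE B (Python) =====
-- SPECIAL_CHARS = [" ", "'", '"', "\n", "\r", "\t", "\f"]
--
-- ESCAPE_TABLE = {
--     "\\": "\\\\",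
--     "'": "\\'",
--     '"': '\\"',
--     "\n": "\\n",
--     "\r": "\\r",
--     "\t": "\\t",
--     "\f": "\\f",
-- }
--
-- def escape_argument(arg: str) -> str:
--     if not arg:
--         return '""'
--     if any((c in arg for c in SPECIAL_CHARS)):
--         # single pass: per-character table lookup instead of seven .replace passes
--         escaped = "".join(ESCAPE_TABLE.get(ch, ch) for ch in arg)
--         return f'"{escaped}"'
--     return arg
-- ===== Notes on version B (the rewrite author's own statement) =====
-- stated objective: simpler
-- what changed: The seven sequential .replace passes over the string are replaced by a single per-character pass that emits each character's escape sequence from a lookup table and joins the pieces.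
import Mathlib
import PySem

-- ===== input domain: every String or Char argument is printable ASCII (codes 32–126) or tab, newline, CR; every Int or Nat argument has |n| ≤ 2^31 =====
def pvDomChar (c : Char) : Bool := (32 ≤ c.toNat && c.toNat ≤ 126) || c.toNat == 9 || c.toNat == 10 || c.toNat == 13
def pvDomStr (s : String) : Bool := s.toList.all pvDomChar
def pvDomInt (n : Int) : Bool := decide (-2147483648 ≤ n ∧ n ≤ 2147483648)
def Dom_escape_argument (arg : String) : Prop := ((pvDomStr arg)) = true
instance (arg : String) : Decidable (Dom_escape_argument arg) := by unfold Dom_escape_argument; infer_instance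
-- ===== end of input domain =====

-- B replaces A's seven sequential .replace passes with a single per-character pass over a lookup table (objective: simpler).

-- ===== PORT A =====
-- SPECIAL_CHARS = [" ", "'", '"', "\n", "\r", "\t", "\f"]
def SPECIAL_CHARS : List String := [" ", "'", "\"", "\n", "\r", "\t", "\x0c"]

def escape_argument (arg : String) : String :=
  if arg.toList.isEmpty then "\"\""
  else if SPECIAL_CHARS.any (fun c => PySem.Str.isIn c arg) then
    "\"" ++
      (PySem.Str.replace
        (PySem.Str.replace
          (PySem.Str.replace
            (PySem.Str.replace
              (PySem.Str.replace
                (PySem.Str.replace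
                  (PySem.Str.replace arg "\\" "\\\\")
                  "'" "\\'")
                "\"" "\\\"")
              "\n" "\\n")
            "\r" "\\r")
          "\t" "\\t")
        "\x0c" "\\f") ++ "\""
  else arg

-- ===== PORT B =====
def ESCAPE_TABLE : PySem.Dict Char String :=
  PySem.Dict.mk [('\\', "\\\\"), ('\'', "\\'"), ('"', "\\\""),
                 ('\n', "\\n"), ('\r', "\\r"), ('\t', "\\t"), ('\x0c', "\\f")]

def escape_argument_alt (arg : String) : String :=
  if arg.toList.isEmpty then "\"\""
  else if SPECIAL_CHARS.any (fun c => PySem.Str.isIn c arg) then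
    -- escaped = "".join(ESCAPE_TABLE.get(ch, ch) for ch in arg)
    "\"" ++
      String.ofList
        (arg.toList.flatMap
          (fun ch => (PySem.Dict.getD ESCAPE_TABLE ch (String.ofList [ch])).toList)) ++ "\""
  else arg

-- ===== PRECONDITION & SPEC =====
def Spec_escape_argument (arg : String) (out : String) : Prop := out = escape_argument_alt arg
instance (arg : String) (out : String) : Decidable (Spec_escape_argument arg out) := by unfold Spec_escape_argument; infer_instance

-- ===== CLAIM (what is proved, stated in full; the proofs are below) =====
def Claim_equal_escape_argument : Prop := ∀ (arg : String), Dom_escape_argument arg → Spec_escape_argument arg (escape_argument arg)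

-- ===== LEMMAS AND PROOFS =====

-- single-character replace is a flatMap over the characters
theorem replace_single_go (a : Char) (new : List Char) :
    ∀ (fuel : Nat) (l acc : List Char), l.length ≤ fuel →
      PySem.Chars.replace.go [a] new fuel l acc =
        acc.reverse ++ l.flatMap (fun c => if c = a then new else [c]) := by
  intro fuel
  induction fuel with
  | zero =>
    intro l acc h
    have : l = [] := List.length_eq_zero_iff.mp (Nat.le_zero.mp h)
    subst this
    simp [PySem.Chars.replace.go]
  | succ n ih =>
    intro l acc h
    cases l with
    | nil => simp [PySem.Chars.replace.go]
    | cons c t =>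
      simp only [PySem.Chars.replace.go]
      by_cases hc : c = a
      · subst hc
        have hpre : List.isPrefixOf [c] (c :: t) = true := by
          simp [List.isPrefixOf]
        rw [if_pos hpre]
        simp only [List.length_cons, List.length_nil, Nat.zero_add, List.drop_succ_cons,
                   List.drop_zero]
        rw [ih _ _ (by simpa using h)]
        simp
      · have hpre : List.isPrefixOf [a] (c :: t) = false := by
          simp [List.isPrefixOf]
          exact fun h' => (hc h'.symm).elim
        rw [if_neg (by simp [hpre])]
        rw [ih _ _ (by simpa using h)]
        simp [hc]

theorem replace_single (a : Char) (new s : List Char) :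
    PySem.Chars.replace s [a] new = s.flatMap (fun c => if c = a then new else [c]) := by
  unfold PySem.Chars.replace
  rw [if_neg (by simp)]
  simpa using replace_single_go a new s.length s [] (le_refl _)

-- the composition of A's seven per-character substitutions equals B's table lookup
theorem perchar_eq (c : Char) :
    List.flatMap
      (fun x =>
        List.flatMap
          (fun x =>
            List.flatMap
              (fun x =>
                List.flatMap
                  (fun x =>
                    List.flatMap
                      (fun x =>
                        List.flatMap (fun y => if y = '\x0c' then ['\\', 'f'] else [y])
                          (if x = '\t' then ['\\', 't'] else [x]))
                      (if x = '\r' then ['\\', 'r'] else [x]))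
                  (if x = '\n' then ['\\', 'n'] else [x]))
              (if x = '"' then ['\\', '"'] else [x]))
          (if x = '\'' then ['\\', '\''] else [x]))
      (if c = '\\' then ['\\', '\\'] else [c]) =
      (PySem.Dict.getD ESCAPE_TABLE c (String.ofList [c])).toList := by
  by_cases h1 : c = '\\'
  · subst h1; decide
  by_cases h2 : c = '\''
  · subst h2; decide
  by_cases h3 : c = '"'
  · subst h3; decide
  by_cases h4 : c = '\n'
  · subst h4; decide
  by_cases h5 : c = '\r'
  · subst h5; decide
  by_cases h6 : c = '\t'
  · subst h6; decide
  by_cases h7 : c = '\x0c'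
  · subst h7; decide
  · have g1 : ('\\' == c) = false := beq_eq_false_iff_ne.mpr (fun h => h1 h.symm)
    have g2 : ('\'' == c) = false := beq_eq_false_iff_ne.mpr (fun h => h2 h.symm)
    have g3 : ('"' == c) = false := beq_eq_false_iff_ne.mpr (fun h => h3 h.symm)
    have g4 : ('\n' == c) = false := beq_eq_false_iff_ne.mpr (fun h => h4 h.symm)
    have g5 : ('\r' == c) = false := beq_eq_false_iff_ne.mpr (fun h => h5 h.symm)
    have g6 : ('\t' == c) = false := beq_eq_false_iff_ne.mpr (fun h => h6 h.symm)
    have g7 : ('\x0c' == c) = false := beq_eq_false_iff_ne.mpr (fun h => h7 h.symm)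
    simp [ESCAPE_TABLE, PySem.Dict.getD, PySem.Dict.get?,
          g1, g2, g3, g4, g5, g6, g7, h1, h2, h3, h4, h5, h6, h7]

-- the seven chained replaces collapse to one flatMap with B's table
theorem chain_eq (s : List Char) :
    PySem.Chars.replace
      (PySem.Chars.replace
        (PySem.Chars.replace
          (PySem.Chars.replace
            (PySem.Chars.replace
              (PySem.Chars.replace
                (PySem.Chars.replace s ['\\'] ['\\', '\\'])
                ['\''] ['\\', '\''])
              ['"'] ['\\', '"'])
            ['\n'] ['\\', 'n'])
          ['\r'] ['\\', 'r'])
        ['\t'] ['\\', 't'])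
      ['\x0c'] ['\\', 'f'] =
    s.flatMap (fun ch => (PySem.Dict.getD ESCAPE_TABLE ch (String.ofList [ch])).toList) := by
  simp only [replace_single, List.flatMap_assoc]
  exact List.flatMap_congr (fun c _ => perchar_eq c)

-- string-level version of chain_eq, shaped exactly like A's escaped expression
theorem str_chain (arg : String) :
    PySem.Str.replace
      (PySem.Str.replace
        (PySem.Str.replace
          (PySem.Str.replace
            (PySem.Str.replace
              (PySem.Str.replace
                (PySem.Str.replace arg "\\" "\\\\")
                "'" "\\'")
              "\"" "\\\"")
            "\n" "\\n")
          "\r" "\\r")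
        "\t" "\\t")
      "\x0c" "\\f" =
    String.ofList
      (arg.toList.flatMap
        (fun ch => (PySem.Dict.getD ESCAPE_TABLE ch (String.ofList [ch])).toList)) := by
  apply String.toList_injective
  rw [String.toList_ofList, ← chain_eq arg.toList]
  simp only [PySem.Str.toList_replace]
  rfl

-- ===== VERDICT (by name: the statement is the Claim_ definition above) =====
theorem escape_argument_spec : Claim_equal_escape_argument := by
  intro arg _
  unfold Spec_escape_argument escape_argument escape_argument_alt
  split
  · rfl
  · split
    · rw [str_chain]
    · rfl
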